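-- pv_equiv track=rewrite | github.com/BoxCosplayer/go-search-engine | backend/app/opensearch.py | _strip_optional_placeholders
-- ===== SOURCE A (Python) =====
-- def _strip_optional_placeholders(template: str) -> str:
--     """Remove optional OpenSearch placeholders like "{foo?}" without regex backtracking."""
--     if "{" not in template:
--         return template
--
--     out: list[str] = []
--     pending: list[str] | None = None
--
--     for ch in template:
--         if pending is None:
--             if ch == "{":
--                 pending = ["{"]
--             else:
--                 out.append(ch)
--             continue
--
--         pending.append(ch)
--         if ch != "}":
--             continue
--
--         if len(pending) > 2 and pending[-2] == "?":
--             pending = None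
--             continue
--
--         out.extend(pending)
--         pending = None
--
--     if pending is not None:
--         out.extend(pending)
--
--     return "".join(out)
-- ===== SOURCE B (Python) =====
-- def _strip_optional_placeholders(template: str) -> str:
--     """Remove optional OpenSearch placeholders by jumping between braces with str.find."""
--     parts = []
--     s = template
--     while True:
--         j = s.find("{")
--         if j == -1:
--             parts.append(s)
--             break
--         k = s.find("}", j)
--         if k == -1:
--             parts.append(s)
--             break
--         parts.append(s[:j])
--         if not (k - j >= 2 and s[k - 1] == "?"):
--             parts.append(s[j:k + 1])
--         s = s[k + 1:]
--     return "".join(parts)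
-- ===== Notes on version B (the rewrite author's own statement) =====
-- stated objective: simpler
-- what changed: Replaced A's char-by-char state machine with pending-buffer bookkeeping by a loop that jumps with str.find from each opening brace to the next closing brace and copies slices, dropping a span whose last character before the closing brace is a question mark.
import Mathlib
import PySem

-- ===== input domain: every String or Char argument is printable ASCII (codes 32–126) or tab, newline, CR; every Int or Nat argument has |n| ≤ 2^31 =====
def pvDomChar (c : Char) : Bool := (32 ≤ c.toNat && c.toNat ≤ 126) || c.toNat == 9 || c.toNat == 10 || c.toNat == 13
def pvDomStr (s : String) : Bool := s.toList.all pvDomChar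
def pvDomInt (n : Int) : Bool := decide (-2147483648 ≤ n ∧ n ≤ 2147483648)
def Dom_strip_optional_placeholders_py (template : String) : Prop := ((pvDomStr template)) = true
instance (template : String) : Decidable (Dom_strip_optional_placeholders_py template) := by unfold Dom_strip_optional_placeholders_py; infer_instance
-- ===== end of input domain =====

-- B replaces A's char-by-char state machine with a find-based scanner that jumps
-- from each opening brace to the next closing brace and copies slices (objective: simpler).

-- ===== PORT A =====
-- one iteration of A's `for ch in template` loop; state = (out, pending)
def pvAStep (st : List Char × Option (List Char)) (ch : Char) : List Char × Option (List Char) :=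
  match st with
  | (out, none) => if ch = '{' then (out, some ['{']) else (out ++ [ch], none)
  | (out, some pend) =>
    let pend := pend ++ [ch]
    if ch ≠ '}' then (out, some pend)
    else if 2 < pend.length ∧ pend[pend.length - 2]? = some '?' then (out, none)
    else (out ++ pend, none)

def strip_optional_placeholders_py (template : String) : String :=
  if '{' ∉ template.toList then template
  else
    let st := template.toList.foldl pvAStep ([], none)
    let out := match st.2 with
      | none => st.1
      | some pend => st.1 ++ pend
    String.ofList out

-- ===== PORT B =====
-- B's while-loop as a recursion on the remaining string: each round finds the next
-- opening brace and the next closing brace after it (the second find with start j is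
-- ported as findIdx? on s.drop j, so k is the index relative to j, i.e. Python's k - j)
def pvBGo (s : List Char) : List Char :=
  match hj : s.findIdx? (· = '{') with
  | none => s
  | some j =>
    match hk : (s.drop j).findIdx? (· = '}') with
    | none => s
    | some k =>
      s.take j ++
      (if 2 ≤ k ∧ (s.drop j)[k - 1]? = some '?' then [] else (s.drop j).take (k + 1)) ++
      pvBGo ((s.drop j).drop (k + 1))
termination_by s.length
decreasing_by
  have hjl : j < s.length := (List.findIdx?_eq_some_iff_getElem.mp hj).1
  have hkl : k < (s.drop j).length := (List.findIdx?_eq_some_iff_getElem.mp hk).1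
  simp only [List.length_drop] at *
  omega

def strip_optional_placeholders_py_alt (template : String) : String :=
  String.ofList (pvBGo template.toList)

-- ===== PRECONDITION & SPEC =====
def Spec_strip_optional_placeholders_py (template : String) (out : String) : Prop := out = strip_optional_placeholders_py_alt template
instance (template : String) (out : String) : Decidable (Spec_strip_optional_placeholders_py template out) := by unfold Spec_strip_optional_placeholders_py; infer_instance

-- ===== CLAIM (what is proved, stated in full; the proofs are below) =====
def Claim_equal_strip_optional_placeholders_py : Prop := ∀ (template : String), Dom_strip_optional_placeholders_py template → Spec_strip_optional_placeholders_py template (strip_optional_placeholders_py template)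

-- ===== LEMMAS AND PROOFS =====

-- finalize A's loop state after the fold
def pvFin (st : List Char × Option (List Char)) : List Char :=
  match st.2 with
  | none => st.1
  | some pend => st.1 ++ pend

-- A's decision when a pending placeholder closes
def pvClose (q : List Char) : List Char :=
  if 2 < q.length ∧ q[q.length - 2]? = some '?' then [] else q

theorem pvBGo_none (s : List Char) (hj : s.findIdx? (· = '{') = none) : pvBGo s = s := by
  rw [pvBGo]
  split
  · rfl
  · next j hj' => rw [hj'] at hj; cases hj

theorem pvBGo_brace_none (s : List Char) (j : Nat) (hj : s.findIdx? (· = '{') = some j)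
    (hk : (s.drop j).findIdx? (· = '}') = none) : pvBGo s = s := by
  rw [pvBGo]
  split
  · rfl
  · next j' hj' =>
    rw [hj'] at hj
    injection hj with e
    subst e
    split
    · rfl
    · next k' hk' => rw [hk'] at hk; cases hk

theorem pvBGo_some (s : List Char) (j k : Nat) (hj : s.findIdx? (· = '{') = some j)
    (hk : (s.drop j).findIdx? (· = '}') = some k) :
    pvBGo s = s.take j ++
      (if 2 ≤ k ∧ (s.drop j)[k - 1]? = some '?' then [] else (s.drop j).take (k + 1)) ++
      pvBGo ((s.drop j).drop (k + 1)) := by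
  rw [pvBGo]
  split
  · next h => rw [h] at hj; cases hj
  · next j' hj' =>
    rw [hj'] at hj
    injection hj with e
    subst e
    split
    · next h => rw [h] at hk; cases hk
    · next k' hk' =>
      rw [hk'] at hk
      injection hk with e
      subst e
      rfl

theorem pvBGo_no_brace (s : List Char) (h : '{' ∉ s) : pvBGo s = s := by
  apply pvBGo_none
  rw [List.findIdx?_eq_none_iff]
  intro x hx
  simp only [decide_eq_false_iff_not]
  exact fun he => h (he ▸ hx)

theorem pvFold_no_brace (u : List Char) (out : List Char) (hu : '{' ∉ u) :
    u.foldl pvAStep (out, none) = (out ++ u, none) := by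
  induction u generalizing out with
  | nil => simp
  | cons c t ih =>
    simp only [List.mem_cons, not_or] at hu
    rw [List.foldl_cons]
    have hcn : ¬ c = '{' := fun h => hu.1 h.symm
    have hstep : pvAStep (out, none) c = (out ++ [c], none) := by
      simp [pvAStep, hcn]
    rw [hstep, ih _ hu.2]
    simp

-- processing from a pending state: A copies chars into pending until the next closing brace
theorem pvFold_pending (s : List Char) (out pend : List Char) :
    pvFin (s.foldl pvAStep (out, some pend)) =
      match s.findIdx? (· = '}') with
      | none => out ++ pend ++ s
      | some k => pvFin ((s.drop (k + 1)).foldl pvAStep (out ++ pvClose (pend ++ s.take (k + 1)), none)) := by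
  induction s generalizing out pend with
  | nil => simp [pvFin]
  | cons c t ih =>
    by_cases hc : c = '}'
    · subst hc
      have hf : ('}' :: t).findIdx? (· = '}') = some 0 := by
        rw [List.findIdx?_cons]; simp
      simp only [hf, List.foldl_cons]
      have hstep : pvAStep (out, some pend) '}' =
          (out ++ pvClose (pend ++ ['}']), none) := by
        simp only [pvAStep, pvClose, ne_eq, not_true_eq_false, if_false, reduceIte]
        split <;> simp
      rw [hstep]
      simp
    · have hdc : (decide (c = '}')) = false := by simp [hc]
      simp only [List.findIdx?_cons, hdc, Bool.false_eq_true, if_false, List.foldl_cons]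
      have hstep : pvAStep (out, some pend) c = (out, some (pend ++ [c])) := by
        simp [pvAStep, hc]
      rw [hstep, ih]
      cases ht : t.findIdx? (· = '}') with
      | none => simp
      | some k =>
        simp only [Option.map_some]
        have harg : pend ++ (c :: t).take (k + 1 + 1) = (pend ++ [c]) ++ t.take (k + 1) := by
          simp
        rw [List.drop_succ_cons, harg]

-- main invariant: running A's loop from a clean state appends pvBGo s to out
theorem pvMain : ∀ (n : Nat) (s : List Char), s.length ≤ n → ∀ out,
    pvFin (s.foldl pvAStep (out, none)) = out ++ pvBGo s := by
  intro n
  induction n with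
  | zero =>
    intro s hs out
    have : s = [] := List.eq_nil_of_length_eq_zero (Nat.le_zero.mp hs)
    subst this
    rw [pvBGo_none [] (by rfl)]
    simp [pvFin]
  | succ n ih =>
    intro s hs out
    cases hj : s.findIdx? (· = '{') with
    | none =>
      have hnb : '{' ∉ s := by
        intro hm
        have := (List.findIdx?_eq_none_iff.mp hj) _ hm
        simp at this
      rw [pvFold_no_brace s out hnb, pvBGo_no_brace s hnb]
      simp [pvFin]
    | some j =>
      obtain ⟨hjl, hpj, hlt⟩ := List.findIdx?_eq_some_iff_getElem.mp hj
      have hsj : s[j] = '{' := by simpa using hpj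
      have hdj : s.drop j = '{' :: s.drop (j + 1) := by
        rw [List.drop_eq_getElem_cons hjl, hsj]
      have hsplit : s = s.take j ++ '{' :: s.drop (j + 1) := by
        conv_lhs => rw [← List.take_append_drop j s]
        rw [hdj]
      have hnb : '{' ∉ s.take j := by
        intro hm
        obtain ⟨i, hi, hgi⟩ := List.getElem_of_mem hm
        have hij : i < j := by
          simp only [List.length_take, lt_min_iff] at hi
          exact hi.1
        rw [List.getElem_take] at hgi
        have := hlt i hij
        simp [hgi] at this
      set t := s.drop (j + 1) with hts
      conv_lhs => rw [hsplit]
      rw [List.foldl_append, pvFold_no_brace _ out hnb]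
      simp only [List.foldl_cons]
      have hstep : pvAStep (out ++ s.take j, none) '{' = (out ++ s.take j, some ['{']) := by
        simp [pvAStep]
      rw [hstep, pvFold_pending]
      cases hk : t.findIdx? (· = '}') with
      | none =>
        have hkc : (s.drop j).findIdx? (· = '}') = none := by
          rw [hdj, List.findIdx?_cons, hk]
          simp
        rw [pvBGo_brace_none s j hj hkc]
        conv_rhs => rw [hsplit]
        simp
      | some k =>
        have hkc : (s.drop j).findIdx? (· = '}') = some (k + 1) := by
          rw [hdj, List.findIdx?_cons, hk]
          simp
        rw [pvBGo_some s j (k + 1) hj hkc]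
        change pvFin _ = _
        obtain ⟨hkl, _, _⟩ := List.findIdx?_eq_some_iff_getElem.mp hk
        have htk : (t.take (k + 1)).length = k + 1 := by
          simp [Nat.succ_le_of_lt hkl]
        have hrec := ih (t.drop (k + 1)) (by
          have : j < s.length := hjl
          simp only [hts, List.length_drop]
          omega) (out ++ s.take j ++ pvClose (['{'] ++ t.take (k + 1)))
        rw [hrec]
        -- identify A's pvClose decision with B's if-condition
        have hcond : pvClose (['{'] ++ t.take (k + 1)) =
            (if 2 ≤ k + 1 ∧ (s.drop j)[k + 1 - 1]? = some '?' then [] else (s.drop j).take (k + 1 + 1)) := by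
          rw [hdj]
          have h1 : (['{'] ++ t.take (k + 1)).length = k + 2 := by simp [htk]
          have hgg : ('{' :: List.take (k + 1) t)[k]? = ('{' :: t)[k]? := by
            cases k with
            | zero => rfl
            | succ m =>
              show (t.take (m + 2))[m]? = t[m]?
              rw [List.getElem?_take_of_lt (by omega)]
          unfold pvClose
          simp only [h1]
          simp only [show (2 < k + 2 ↔ 2 ≤ k + 1) from by omega]
          simp only [List.take_succ_cons, List.singleton_append, Nat.add_sub_cancel,
            show k + 2 - 2 = k from by omega, show 2 ≤ k + 1 ↔ 1 ≤ k from by omega]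
          simp only [hgg]
        rw [hcond]
        have hdrop : (s.drop j).drop (k + 1 + 1) = t.drop (k + 1) := by
          rw [hdj, List.drop_succ_cons]
        rw [hdrop]
        simp

-- ===== VERDICT (by name: the statement is the Claim_ definition above) =====
theorem strip_optional_placeholders_py_spec : Claim_equal_strip_optional_placeholders_py := by
  intro template _
  unfold Spec_strip_optional_placeholders_py strip_optional_placeholders_py strip_optional_placeholders_py_alt
  by_cases hb : '{' ∈ template.toList
  · rw [if_neg (by simpa using hb)]
    have := pvMain template.toList.length template.toList le_rfl []
    simp only [List.nil_append] at this
    simp only [pvFin] at this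
    rw [← this]
  · rw [if_pos (by simpa using hb)]
    rw [pvBGo_no_brace _ hb, String.ofList_toList]
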